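-- pv_equiv track=rewrite | github.com/GMcDowellJr/Revit_Fingerprint | validators/record_v2.py | _compute_identity_quality
-- ===== SOURCE A (Python) =====
-- from typing import Any, Dict, List, Optional, Tuple
--
-- def _compute_identity_quality(status: Any, required_qs: List[str], registry: Dict[str, Any]) -> str:
--     if status == "blocked":
--         return "none_blocked"
--     # dominance over required keys only
--     if any(q == "unreadable" for q in required_qs):
--         return "incomplete_unreadable"
--     if any(q == "unsupported" for q in required_qs):
--         return "incomplete_unsupported"
--     if any(q == "missing" for q in required_qs):
--         return "incomplete_missing"
--     return "complete"
-- ===== SOURCE B (Python) =====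
-- def _compute_identity_quality(status, required_qs, registry):
--     if status == "blocked":
--         return "none_blocked"
--     # single pass: track the best (lowest) precedence rank seen
--     rank = {"unreadable": 0, "unsupported": 1, "missing": 2}
--     best = 3
--     for q in required_qs:
--         r = rank.get(q, 3)
--         if r < best:
--             best = r
--     return ("incomplete_unreadable", "incomplete_unsupported",
--             "incomplete_missing", "complete")[best]
-- ===== Notes on version B (the rewrite author's own statement) =====
-- stated objective: alternative
-- what changed: Replaces A's three separate any-scans over required_qs by one pass that tracks the minimum precedence rank and maps it to the verdict at the end.
import Mathlib
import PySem

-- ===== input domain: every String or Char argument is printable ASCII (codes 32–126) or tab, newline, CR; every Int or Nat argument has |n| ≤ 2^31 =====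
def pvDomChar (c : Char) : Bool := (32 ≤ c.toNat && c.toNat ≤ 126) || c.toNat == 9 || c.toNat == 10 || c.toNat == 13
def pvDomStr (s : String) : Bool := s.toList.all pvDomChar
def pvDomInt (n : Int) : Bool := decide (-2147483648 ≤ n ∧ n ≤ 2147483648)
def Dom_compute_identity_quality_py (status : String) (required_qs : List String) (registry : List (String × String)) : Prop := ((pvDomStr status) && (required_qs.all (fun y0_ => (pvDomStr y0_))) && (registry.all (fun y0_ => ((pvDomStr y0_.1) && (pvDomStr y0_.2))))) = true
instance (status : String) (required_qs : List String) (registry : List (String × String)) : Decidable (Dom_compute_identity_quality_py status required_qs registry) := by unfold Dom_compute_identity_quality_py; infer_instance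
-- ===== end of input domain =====

-- B replaces A's three any-scans with a single pass tracking the minimum precedence rank (alternative decomposition, same cost class).

-- ===== PORT A =====
def compute_identity_quality_py (status : String) (required_qs : List String) (registry : List (String × String)) : String :=
  if status == "blocked" then "none_blocked"
  else if required_qs.any (fun q => q == "unreadable") then "incomplete_unreadable"
  else if required_qs.any (fun q => q == "unsupported") then "incomplete_unsupported"
  else if required_qs.any (fun q => q == "missing") then "incomplete_missing"
  else "complete"

-- ===== PORT B =====
-- rank.get(q, 3) over the literal precedence dict
def pvRankOf (q : String) : Nat :=
  if q == "unreadable" then 0 else if q == "unsupported" then 1 else if q == "missing" then 2 else 3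

def compute_identity_quality_py_alt (status : String) (required_qs : List String) (registry : List (String × String)) : String :=
  if status == "blocked" then "none_blocked"
  else
    let best := required_qs.foldl (fun best q => let r := pvRankOf q; if r < best then r else best) 3
    ["incomplete_unreadable", "incomplete_unsupported", "incomplete_missing", "complete"].getD best "complete"

-- ===== PRECONDITION & SPEC =====
def Spec_compute_identity_quality_py (status : String) (required_qs : List String) (registry : List (String × String)) (out : String) : Prop := out = compute_identity_quality_py_alt status required_qs registry
instance (status : String) (required_qs : List String) (registry : List (String × String)) (out : String) : Decidable (Spec_compute_identity_quality_py status required_qs registry out) := by unfold Spec_compute_identity_quality_py; infer_instance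

-- ===== CLAIM (what is proved, stated in full; the proofs are below) =====
def Claim_equal_compute_identity_quality_py : Prop := ∀ (status : String) (required_qs : List String) (registry : List (String × String)), Dom_compute_identity_quality_py status required_qs registry → Spec_compute_identity_quality_py status required_qs registry (compute_identity_quality_py status required_qs registry)

-- ===== LEMMAS AND PROOFS =====

-- the minimum rank of a list, expressed by A's any-chain
def pvChain (l : List String) : Nat :=
  if l.any (fun q => q == "unreadable") then 0
  else if l.any (fun q => q == "unsupported") then 1
  else if l.any (fun q => q == "missing") then 2
  else 3

theorem pvChain_cons (q : String) (l : List String) :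
    pvChain (q :: l) = min (pvRankOf q) (pvChain l) := by
  unfold pvChain pvRankOf
  by_cases e0 : q == "unreadable" <;> by_cases e1 : q == "unsupported" <;>
    by_cases e2 : q == "missing" <;>
    by_cases h0 : l.any (fun q => q == "unreadable") <;>
    by_cases h1 : l.any (fun q => q == "unsupported") <;>
    by_cases h2 : l.any (fun q => q == "missing") <;>
      simp_all

theorem pvFoldl_min (b : Nat) (l : List String) (hb : b ≤ 3) :
    l.foldl (fun best q => let r := pvRankOf q; if r < best then r else best) b
      = min b (pvChain l) := by
  induction l generalizing b with
  | nil => simp [pvChain]; omega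
  | cons q l ih =>
    simp only [List.foldl_cons, pvChain_cons]
    have hr : pvRankOf q ≤ 3 := by unfold pvRankOf; split_ifs <;> omega
    have : (if pvRankOf q < b then pvRankOf q else b) = min b (pvRankOf q) := by
      split_ifs <;> omega
    rw [this, ih _ (by omega)]
    omega

-- ===== VERDICT (by name: the statement is the Claim_ definition above) =====
theorem compute_identity_quality_py_spec : Claim_equal_compute_identity_quality_py := by
  intro status required_qs registry _
  unfold Spec_compute_identity_quality_py compute_identity_quality_py compute_identity_quality_py_alt
  by_cases hb : status == "blocked"
  · simp [hb]
  · simp only [hb, Bool.false_eq_true, if_false]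
    rw [pvFoldl_min 3 required_qs (by omega)]
    by_cases h0 : required_qs.any (fun q => q == "unreadable") <;>
    by_cases h1 : required_qs.any (fun q => q == "unsupported") <;>
    by_cases h2 : required_qs.any (fun q => q == "missing") <;>
      simp [pvChain, h0, h1, h2]
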